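-- pv_equiv track=rewrite | github.com/jm-RBT/Pagasa-WebScraper | typhoon_extraction_ml.py | _build_island_group_dict
-- ===== SOURCE A (Python) =====
-- from typing import Dict, List, Tuple, Optional, Any
--
-- def _build_island_group_dict(warnings_by_level: Dict[int, Dict[str, Optional[str]]], level: int) -> Dict:
--     """Build IslandGroupType dictionary for specific warning level"""
--     result = {
--         'Luzon': None,
--         'Visayas': None,
--         'Mindanao': None,
--         'Other': None
--     }
--
--     if level in warnings_by_level:
--         level_data = warnings_by_level[level]
--         for island_group, location_string in level_data.items():
--             if island_group in result:
--                 result[island_group] = location_string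
--
--     return result
-- ===== SOURCE B (Python) =====
-- from typing import Dict, Optional
--
-- def _build_island_group_dict(warnings_by_level: Dict[int, Dict[str, Optional[str]]], level: int) -> Dict:
--     """Build IslandGroupType dictionary for specific warning level"""
--     level_data = warnings_by_level.get(level, {})
--     return {key: level_data.get(key) for key in ('Luzon', 'Visayas', 'Mindanao', 'Other')}
-- ===== Notes on version B (the rewrite author's own statement) =====
-- stated objective: simpler
-- what changed: Instead of initializing four None slots and scanning the level's dict filtering entries by membership into the result, B drives from the fixed key tuple: a comprehension over ('Luzon','Visayas','Mindanao','Other') looks each key up in warnings_by_level.get(level, {}), so the source scan and the membership test disappear.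
import Mathlib
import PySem

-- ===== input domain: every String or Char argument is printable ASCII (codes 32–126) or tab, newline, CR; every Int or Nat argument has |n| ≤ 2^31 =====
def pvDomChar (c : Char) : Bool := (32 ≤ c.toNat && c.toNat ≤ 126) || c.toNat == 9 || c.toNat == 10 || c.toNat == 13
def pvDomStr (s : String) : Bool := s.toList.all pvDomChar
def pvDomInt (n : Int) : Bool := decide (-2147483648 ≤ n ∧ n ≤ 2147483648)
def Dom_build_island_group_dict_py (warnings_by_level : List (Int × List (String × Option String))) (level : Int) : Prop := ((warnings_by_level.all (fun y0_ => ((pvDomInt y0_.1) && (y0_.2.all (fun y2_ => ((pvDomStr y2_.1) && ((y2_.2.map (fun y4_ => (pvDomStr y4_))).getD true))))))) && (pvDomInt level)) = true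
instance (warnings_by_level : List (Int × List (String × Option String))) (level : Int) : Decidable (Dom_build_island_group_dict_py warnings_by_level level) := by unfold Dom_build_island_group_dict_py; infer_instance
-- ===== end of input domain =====

-- B drives the result from the fixed key tuple with dict lookups instead of scanning the
-- level's entries and filtering them by membership into four pre-set None slots (simpler).

-- ===== PORT A =====
def build_island_group_dict_py (warnings_by_level : List (Int × List (String × Option String))) (level : Int) : List (String × Option String) :=
  -- result = {'Luzon': None, 'Visayas': None, 'Mindanao': None, 'Other': None}
  let result : PySem.Dict String (Option String) :=
    ((((PySem.Dict.empty.insert "Luzon" none).insert "Visayas" none).insert "Mindanao" none).insert "Other" none)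
  -- if level in warnings_by_level: for island_group, location_string in level_data.items(): …
  let result :=
    match (PySem.Dict.mk warnings_by_level).get? level with
    | some level_data =>
        level_data.foldl
          (fun (r : PySem.Dict String (Option String)) (p : String × Option String) => if r.contains p.1 then r.insert p.1 p.2 else r) result
    | none => result
  result.items

-- ===== PORT B =====
def build_island_group_dict_py_alt (warnings_by_level : List (Int × List (String × Option String))) (level : Int) : List (String × Option String) :=
  -- level_data = warnings_by_level.get(level, {})
  let level_data := PySem.Dict.mk (((PySem.Dict.mk warnings_by_level).get? level).getD [])
  -- {key: level_data.get(key) for key in ('Luzon', 'Visayas', 'Mindanao', 'Other')}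
  ["Luzon", "Visayas", "Mindanao", "Other"].map (fun key => (key, (level_data.get? key).getD none))

-- ===== PRECONDITION & SPEC =====
-- Pre_ excludes association lists whose inner dicts carry duplicate keys: such inputs cannot
-- arise from a Python dict, and on them A's keep-the-last value vs B's keep-the-first is accidental.
def Pre_build_island_group_dict_py (warnings_by_level : List (Int × List (String × Option String))) (level : Int) : Prop :=
  ∀ p ∈ warnings_by_level, (p.2.map Prod.fst).Nodup
instance (warnings_by_level : List (Int × List (String × Option String))) (level : Int) : Decidable (Pre_build_island_group_dict_py warnings_by_level level) := by unfold Pre_build_island_group_dict_py; infer_instance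

def pvWitness_build_island_group_dict_py : (List (Int × List (String × Option String))) × Int :=
  ([(1, [("Luzon", some "Manila"), ("Other", none)])], 1)

def Spec_build_island_group_dict_py (warnings_by_level : List (Int × List (String × Option String))) (level : Int) (out : List (String × Option String)) : Prop := out = build_island_group_dict_py_alt warnings_by_level level
instance (warnings_by_level : List (Int × List (String × Option String))) (level : Int) (out : List (String × Option String)) : Decidable (Spec_build_island_group_dict_py warnings_by_level level out) := by unfold Spec_build_island_group_dict_py; infer_instance

-- ===== CLAIM (what is proved, stated in full; the proofs are below) =====
def Claim_equal_build_island_group_dict_py : Prop := ∀ (warnings_by_level : List (Int × List (String × Option String))) (level : Int), Dom_build_island_group_dict_py warnings_by_level level → Pre_build_island_group_dict_py warnings_by_level level → Spec_build_island_group_dict_py warnings_by_level level (build_island_group_dict_py warnings_by_level level)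

-- ===== LEMMAS AND PROOFS =====

-- the shape A's accumulator keeps throughout the loop: the four fixed keys in order
def mk4 (a b c o : Option String) : PySem.Dict String (Option String) :=
  PySem.Dict.mk [("Luzon", a), ("Visayas", b), ("Mindanao", c), ("Other", o)]

-- first-match lookup with fallback, the per-key value B computes
def g (l : List (String × Option String)) (k : String) (v : Option String) : Option String :=
  ((PySem.Dict.mk l).get? k).getD v

lemma init_eq : ((((PySem.Dict.empty.insert "Luzon" none).insert "Visayas" none).insert "Mindanao" none).insert "Other" (none : Option String)) = mk4 none none none none := by
  decide

lemma step_mk4 (a b c o v : Option String) (k : String) :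
    (if (mk4 a b c o).contains k then (mk4 a b c o).insert k v else mk4 a b c o)
      = mk4 (if k = "Luzon" then v else a) (if k = "Visayas" then v else b)
            (if k = "Mindanao" then v else c) (if k = "Other" then v else o) := by
  by_cases h1 : k = "Luzon"
  · subst h1; simp [mk4, PySem.Dict.contains, PySem.Dict.insert]
  · by_cases h2 : k = "Visayas"
    · subst h2; simp [mk4, PySem.Dict.contains, PySem.Dict.insert]
    · by_cases h3 : k = "Mindanao"
      · subst h3; simp [mk4, PySem.Dict.contains, PySem.Dict.insert]
      · by_cases h4 : k = "Other"
        · subst h4; simp [mk4, PySem.Dict.contains, PySem.Dict.insert]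
        · have e1 : ("Luzon" == k) = false := beq_eq_false_iff_ne.mpr (fun e => h1 e.symm)
          have e2 : ("Visayas" == k) = false := beq_eq_false_iff_ne.mpr (fun e => h2 e.symm)
          have e3 : ("Mindanao" == k) = false := beq_eq_false_iff_ne.mpr (fun e => h3 e.symm)
          have e4 : ("Other" == k) = false := beq_eq_false_iff_ne.mpr (fun e => h4 e.symm)
          simp [mk4, PySem.Dict.contains, e1, e2, e3, e4, h1, h2, h3, h4]

lemma g_cons (k0 : String) (v0 : Option String) (t : List (String × Option String))
    (k : String) (a : Option String) (h : k0 ∉ t.map Prod.fst) :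
    g ((k0, v0) :: t) k a = g t k (if k0 = k then v0 else a) := by
  by_cases hk : k0 = k
  · subst hk
    have ht : (PySem.Dict.mk t).get? k0 = none := by
      rw [PySem.Dict.get?_eq_none_iff_not_mem_keys]
      simpa [PySem.Dict.keys_mk] using h
    simp [g, PySem.Dict.get?_mk_cons, ht]
  · have hb : (k0 == k) = false := beq_eq_false_iff_ne.mpr hk
    simp [g, PySem.Dict.get?_mk_cons, hb, hk]

lemma fold4 : ∀ (l : List (String × Option String)), (l.map Prod.fst).Nodup →
    ∀ (a b c o : Option String),
    l.foldl (fun r (p : String × Option String) => if r.contains p.1 then r.insert p.1 p.2 else r) (mk4 a b c o)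
      = mk4 (g l "Luzon" a) (g l "Visayas" b) (g l "Mindanao" c) (g l "Other" o) := by
  intro l
  induction l with
  | nil => intro _ a b c o; simp [g, PySem.Dict.get?]
  | cons p t ih =>
      intro hnd a b c o
      obtain ⟨k0, v0⟩ := p
      rw [List.map_cons] at hnd
      have hnotin : k0 ∉ t.map Prod.fst := (List.nodup_cons.mp hnd).1
      have hndt : (t.map Prod.fst).Nodup := (List.nodup_cons.mp hnd).2
      simp only [List.foldl_cons]
      rw [step_mk4, ih hndt,
          g_cons k0 v0 t "Luzon" a hnotin, g_cons k0 v0 t "Visayas" b hnotin,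
          g_cons k0 v0 t "Mindanao" c hnotin, g_cons k0 v0 t "Other" o hnotin]

-- ===== VERDICT (by name: the statement is the Claim_ definition above) =====
theorem build_island_group_dict_py_spec : Claim_equal_build_island_group_dict_py := by
  intro wbl level _ hpre
  unfold Spec_build_island_group_dict_py
  unfold build_island_group_dict_py build_island_group_dict_py_alt
  rcases hget : (PySem.Dict.mk wbl).get? level with _ | ld
  · simp [init_eq, mk4, PySem.Dict.get?, List.map]
  · have hmem : (level, ld) ∈ wbl := by
      have := PySem.Dict.mem_items_of_get?_eq_some (PySem.Dict.mk wbl) hget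
      simpa [PySem.Dict.items] using this
    have hnd : (ld.map Prod.fst).Nodup := hpre _ hmem
    simp only [init_eq]
    rw [fold4 ld hnd]
    simp [mk4, g, List.map]
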